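-- pv_equiv track=rewrite | github.com/sad2project/pyimmatcher | src/pyimmatcher/basic/collections.py | _skip_until_element
-- ===== SOURCE A (Python) =====
-- from typing import TypeVar, Sequence, Generator, Iterable
--
-- E = TypeVar('E', covariant=True)
--
-- def _skip_until_element(seq: Sequence[E], el: E) -> Generator[E, None, None]:
--     try:
--         iterator = iter(seq)
--         current = next(iterator)
--
--         # loop through the iterator until you find an element that matches or
--         # until you hit the end
--         while current != el:
--             current = next(iterator)
--
--         # yield the matching element as well as the rest of the iterator
--         yield current
--         yield from iterator
--     except StopIteration:
--         return
-- ===== SOURCE B (Python) =====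
-- def _skip_until_element(seq, el):
--     try:
--         i = list(seq).index(el)
--     except ValueError:
--         return
--     yield from seq[i:]
-- ===== Notes on version B (the rewrite author's own statement) =====
-- stated objective: idiomatic
-- what changed: Replaces A's manual iterator advance (next/StopIteration while-loop that consumes until a match, then yields the rest) with a staged computation: locate the first occurrence with list.index and yield the slice seq[i:], returning nothing on ValueError.
import Mathlib
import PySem

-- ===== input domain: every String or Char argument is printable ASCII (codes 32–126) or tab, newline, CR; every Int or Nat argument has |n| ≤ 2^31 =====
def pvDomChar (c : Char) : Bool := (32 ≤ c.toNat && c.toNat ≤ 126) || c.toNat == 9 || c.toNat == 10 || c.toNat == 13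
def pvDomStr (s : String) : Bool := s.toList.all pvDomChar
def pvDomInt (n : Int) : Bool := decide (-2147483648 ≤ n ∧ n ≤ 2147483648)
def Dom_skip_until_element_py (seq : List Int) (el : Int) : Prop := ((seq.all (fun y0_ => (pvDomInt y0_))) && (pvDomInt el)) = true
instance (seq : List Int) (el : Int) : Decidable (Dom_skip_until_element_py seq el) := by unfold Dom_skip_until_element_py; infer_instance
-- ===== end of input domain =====

-- B replaces A's iterator/next/StopIteration skip loop by a staged index-then-slice:
-- list.index finds the first occurrence, then seq[i:] is yielded (objective: idiomatic).


-- ===== PORT A =====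
-- A: advance through the sequence while current != el (StopIteration → []),
-- then yield the matching element and the rest of the iterator.
def skip_until_element_py (seq : List Int) (el : Int) : List Int :=
  match seq with
  | [] => []                                  -- next() raised StopIteration
  | current :: rest =>
    if current ≠ el then skip_until_element_py rest el
    else current :: rest

-- ===== PORT B =====
-- B: i = list(seq).index(el) (ValueError → []), then yield from seq[i:].
def skip_until_element_py_alt (seq : List Int) (el : Int) : List Int :=
  match PySem.List.index? seq el with
  | none => []
  | some i => PySem.List.slice seq (some (i : Int)) none

-- ===== PRECONDITION & SPEC =====
def Spec_skip_until_element_py (seq : List Int) (el : Int) (out : List Int) : Prop := out = skip_until_element_py_alt seq el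
instance (seq : List Int) (el : Int) (out : List Int) : Decidable (Spec_skip_until_element_py seq el out) := by unfold Spec_skip_until_element_py; infer_instance

-- ===== CLAIM =====
def Claim_equal_skip_until_element_py : Prop := ∀ (seq : List Int) (el : Int), Dom_skip_until_element_py seq el → Spec_skip_until_element_py seq el (skip_until_element_py seq el)

-- ===== LEMMAS AND PROOFS =====

theorem pvAlt_eq (seq : List Int) (el : Int) :
    skip_until_element_py seq el = skip_until_element_py_alt seq el := by
  induction seq with
  | nil => simp [skip_until_element_py, skip_until_element_py_alt, PySem.List.index?]
  | cons x xs ih =>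
    by_cases h : x = el
    · subst h
      rw [skip_until_element_py_alt, PySem.List.index?_cons_self]
      simp [skip_until_element_py, PySem.List.slice_from_natCast]
    · rw [skip_until_element_py]
      simp only [h, ne_eq, not_false_eq_true, if_pos]
      rw [ih, skip_until_element_py_alt, skip_until_element_py_alt,
          PySem.List.index?_cons_of_ne xs h]
      cases hi : PySem.List.index? xs el with
      | none => simp
      | some i =>
        simp only [Option.map_some]
        rw [PySem.List.slice_from_natCast, PySem.List.slice_from_natCast,
            List.drop_succ_cons]

-- ===== VERDICT =====
theorem skip_until_element_py_spec : Claim_equal_skip_until_element_py := by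
  intro seq el _
  exact pvAlt_eq seq el
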